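-- pv_equiv track=rewrite | github.com/yingHH/Scripts-during-Ph.D | vennTools/count_venn.py | count_venn2
-- ===== SOURCE A (Python) =====
-- def count_venn2(isets):
--     assert len(isets) == 2
--
--     a, b = isets
--
--     aINb = a & b
--
--     aNum, bNum, abNum = \
--         [len(i) for i in [a, b, aINb]]
--
--     v11 = abNum
--     v10 = aNum - abNum
--     v01 = bNum - abNum
--
--     return v10, v01, v11
-- ===== SOURCE B (Python) =====
-- def count_venn2(isets):
--     a, b = isets
--     v10 = v01 = v11 = 0
--     for x in a:
--         if x in b:
--             v11 += 1
--         else: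
--             v10 += 1
--     for y in b:
--         if y not in a:
--             v01 += 1
--     return v10, v01, v11
-- ===== Notes on version B (the rewrite author's own statement) =====
-- stated objective: alternative
-- what changed: B never builds the intersection set: it classifies each element of a and b individually with membership tests, accumulating the three region counters in two explicit loops, instead of A's set-algebra (a & b) plus length subtraction.
import Mathlib
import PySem

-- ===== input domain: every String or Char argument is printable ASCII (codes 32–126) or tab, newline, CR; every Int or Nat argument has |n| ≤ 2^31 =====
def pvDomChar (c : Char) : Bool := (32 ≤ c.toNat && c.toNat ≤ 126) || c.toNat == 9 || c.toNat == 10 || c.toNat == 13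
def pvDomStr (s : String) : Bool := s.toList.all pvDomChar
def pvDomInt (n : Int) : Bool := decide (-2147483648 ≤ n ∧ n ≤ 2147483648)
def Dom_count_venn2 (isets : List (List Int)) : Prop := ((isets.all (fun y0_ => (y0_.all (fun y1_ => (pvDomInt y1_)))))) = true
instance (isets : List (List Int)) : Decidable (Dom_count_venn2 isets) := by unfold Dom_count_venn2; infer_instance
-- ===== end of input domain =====

-- B replaces A's set algebra (a & b plus length subtraction) by explicit per-element
-- classification loops with three counters; an alternative, not claimed faster.


-- ===== PORT A =====
-- assert len(isets) == 2; a, b = isets; aINb = a & b; return (len a - len aINb, len b - len aINb, len aINb).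
-- Outside Pre_ (len(isets) ≠ 2) the Python raises AssertionError; the port's value there is a dummy.
def count_venn2 (isets : List (List Int)) : Int × Int × Int :=
  match isets with
  | [a, b] =>
    let aINb := PySem.Set.inter a b
    let aNum : Int := a.length
    let bNum : Int := b.length
    let abNum : Int := aINb.length
    let v11 := abNum
    let v10 := aNum - abNum
    let v01 := bNum - abNum
    (v10, v01, v11)
  | _ => (0, 0, 0)

-- ===== PORT B =====
-- a, b = isets; counters v10 = v01 = v11 = 0; for x in a: if x in b then v11 += 1 else v10 += 1;
-- for y in b: if y not in a then v01 += 1; return (v10, v01, v11).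
-- Outside Pre_ (len(isets) ≠ 2) the Python raises ValueError on the unpack; dummy value.
def count_venn2_alt (isets : List (List Int)) : Int × Int × Int :=
  if isets.length = 2 then
    let a := isets.headD []
    let b := (isets.drop 1).headD []
    let s1 := a.foldl
      (fun (p : Int × Int × Int) x =>
        if x ∈ b then (p.1, p.2.1, p.2.2 + 1) else (p.1 + 1, p.2.1, p.2.2))
      ((0 : Int), (0 : Int), (0 : Int))
    let s2 := b.foldl
      (fun (p : Int × Int × Int) y =>
        if y ∉ a then (p.1, p.2.1 + 1, p.2.2) else p)
      s1
    s2
  else (0, 0, 0)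

-- ===== PRECONDITION & SPEC =====
-- Pre_: exactly two sets (the assert / the unpack), each in the convention's set encoding
-- (a list of DISTINCT elements — the Python arguments are sets, so duplicates never occur).
def Pre_count_venn2 (isets : List (List Int)) : Prop :=
  isets.length = 2 ∧ ∀ s ∈ isets, s.Nodup
instance (isets : List (List Int)) : Decidable (Pre_count_venn2 isets) := by
  unfold Pre_count_venn2; infer_instance
def pvWitness_count_venn2 : List (List Int) := [[1, 2, 3], [2, 3, 4]]
def Spec_count_venn2 (isets : List (List Int)) (out : Int × Int × Int) : Prop := out = count_venn2_alt isets
instance (isets : List (List Int)) (out : Int × Int × Int) : Decidable (Spec_count_venn2 isets out) := by unfold Spec_count_venn2; infer_instance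

-- ===== CLAIM (what is proved, stated in full; the proofs are below) =====
def Claim_equal_count_venn2 : Prop := ∀ (isets : List (List Int)), Dom_count_venn2 isets → Pre_count_venn2 isets → Spec_count_venn2 isets (count_venn2 isets)

-- ===== LEMMAS AND PROOFS =====

-- B's first loop: classifies each element of a, adding to v10 or v11.
theorem foldl_classify (b : List Int) (a : List Int) (p : Int × Int × Int) :
    a.foldl
      (fun (p : Int × Int × Int) x =>
        if x ∈ b then (p.1, p.2.1, p.2.2 + 1) else (p.1 + 1, p.2.1, p.2.2)) p
    = (p.1 + (a.countP (fun x => decide (x ∉ b)) : Int),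
       p.2.1,
       p.2.2 + (a.countP (fun x => decide (x ∈ b)) : Int)) := by
  induction a generalizing p with
  | nil => simp
  | cons x xs ih =>
    by_cases h : x ∈ b <;> simp [h, ih] <;> ring_nf

-- B's second loop: counts elements of b outside a into v01.
theorem foldl_classify2 (a : List Int) (b : List Int) (p : Int × Int × Int) :
    b.foldl
      (fun (p : Int × Int × Int) y =>
        if y ∉ a then (p.1, p.2.1 + 1, p.2.2) else p) p
    = (p.1, p.2.1 + (b.countP (fun y => decide (y ∉ a)) : Int), p.2.2) := by
  induction b generalizing p with
  | nil => simp
  | cons y ys ih =>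
    rw [List.foldl_cons, List.countP_cons]
    by_cases h : y ∈ a
    · rw [if_neg (not_not_intro h), ih]
      simp [h]
    · rw [if_pos h, ih]
      simp [h]; ring

-- The two one-sided intersection counts agree on nodup lists (both are nodup, same members).
theorem filter_mem_length_comm (a b : List Int) (ha : a.Nodup) (hb : b.Nodup) :
    (a.filter (fun x => decide (x ∈ b))).length = (b.filter (fun x => decide (x ∈ a))).length := by
  apply List.Perm.length_eq
  rw [List.perm_ext_iff_of_nodup (ha.filter _) (hb.filter _)]
  intro x
  simp only [List.mem_filter, decide_eq_true_eq]
  exact and_comm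

theorem inter_eq_filter (a b : List Int) :
    PySem.Set.inter a b = a.filter (fun x => decide (x ∈ b)) := by
  simp [PySem.Set.inter, PySem.Set.contains]

-- ===== VERDICT (by name: the statement is the Claim_ definition above) =====
theorem count_venn2_spec : Claim_equal_count_venn2 := by
  intro isets _ hpre
  obtain ⟨hlen, hnd⟩ := hpre
  match isets with
  | [a, b] =>
    have ha := hnd a (by simp)
    have hb := hnd b (by simp)
    show count_venn2 [a, b] = count_venn2_alt [a, b]
    have hB : count_venn2_alt [a, b]
        = List.foldl (fun (p : Int × Int × Int) y => if y ∉ a then (p.1, p.2.1 + 1, p.2.2) else p)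
            (List.foldl (fun (p : Int × Int × Int) x =>
              if x ∈ b then (p.1, p.2.1, p.2.2 + 1) else (p.1 + 1, p.2.1, p.2.2)) (0, 0, 0) a) b := rfl
    rw [hB, foldl_classify, foldl_classify2]
    simp only [count_venn2]
    have hI : (PySem.Set.inter a b).length = (a.filter (fun x => decide (x ∈ b))).length := by
      rw [inter_eq_filter]
    have hIc : (a.filter (fun x => decide (x ∈ b))).length
        = a.countP (fun x => decide (x ∈ b)) := (List.countP_eq_length_filter (l := a) (p := fun x => decide (x ∈ b))).symm
    have hsplitA := List.length_eq_countP_add_countP (l := a) (fun x => decide (x ∈ b))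
    have hsplitB := List.length_eq_countP_add_countP (l := b) (fun y => decide (y ∈ a))
    have hBc : (b.filter (fun y => decide (y ∈ a))).length
        = b.countP (fun y => decide (y ∈ a)) := (List.countP_eq_length_filter (l := b) (p := fun y => decide (y ∈ a))).symm
    have hcomm := filter_mem_length_comm a b ha hb
    have hnegA : a.countP (fun x => decide (x ∉ b))
        = a.countP (fun x => decide ¬(decide (x ∈ b) = true)) := by
      apply List.countP_congr; intro x _; simp
    have hnegB : b.countP (fun y => decide (y ∉ a))
        = b.countP (fun y => decide ¬(decide (y ∈ a) = true)) := by
      apply List.countP_congr; intro y _; simp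
    simp only [Prod.mk.injEq]
    refine ⟨by push_cast [hnegA]; omega, by push_cast [hnegB]; omega, by omega⟩
  | [] => simp at hlen
  | [_] => simp at hlen
  | _ :: _ :: _ :: _ => simp at hlen
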